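-- pv_equiv track=rewrite | github.com/jw-chae/ViTCM_LLM | codes/TONGUE_diagnosis/evalutation/evaluation2_ver2.py | classify_to_categories
-- ===== SOURCE A (Python) =====
-- from typing import List, Tuple, Dict, Any
--
-- def classify_to_categories(token_list: List[str], category_map: Dict[str, str]) -> Dict[str, List[str]]:
--     cats = {'tongue': [], 'coat': [], 'location': [], 'other': []}
--     for tk in token_list:
--         if '_' not in tk:
--             cats['other'].append(tk)
--             continue
--         prefix, _ = tk.split('_', 1)
--         cat = category_map.get(prefix, 'other')
--         if cat not in cats:
--             cats['other'].append(tk)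
--         else:
--             cats[cat].append(tk)
--     return cats
-- ===== SOURCE B (Python) =====
-- from typing import List, Dict
--
-- _VALID = ('tongue', 'coat', 'location', 'other')
--
-- def _cat_of(tk, category_map):
--     if '_' not in tk:
--         return 'other'
--     cat = category_map.get(tk.split('_', 1)[0], 'other')
--     return cat if cat in _VALID else 'other'
--
-- def classify_to_categories(token_list: List[str], category_map: Dict[str, str]) -> Dict[str, List[str]]:
--     return {c: [tk for tk in token_list if _cat_of(tk, category_map) == c] for c in _VALID}
-- ===== Notes on version B (the rewrite author's own statement) =====
-- stated objective: alternative
-- what changed: Replaces A's single grouping loop that mutates a four-bucket dict by a per-token category predicate cat_of plus one filtering comprehension per fixed category, so the result is built category-by-category instead of token-by-token.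
import Mathlib
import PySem

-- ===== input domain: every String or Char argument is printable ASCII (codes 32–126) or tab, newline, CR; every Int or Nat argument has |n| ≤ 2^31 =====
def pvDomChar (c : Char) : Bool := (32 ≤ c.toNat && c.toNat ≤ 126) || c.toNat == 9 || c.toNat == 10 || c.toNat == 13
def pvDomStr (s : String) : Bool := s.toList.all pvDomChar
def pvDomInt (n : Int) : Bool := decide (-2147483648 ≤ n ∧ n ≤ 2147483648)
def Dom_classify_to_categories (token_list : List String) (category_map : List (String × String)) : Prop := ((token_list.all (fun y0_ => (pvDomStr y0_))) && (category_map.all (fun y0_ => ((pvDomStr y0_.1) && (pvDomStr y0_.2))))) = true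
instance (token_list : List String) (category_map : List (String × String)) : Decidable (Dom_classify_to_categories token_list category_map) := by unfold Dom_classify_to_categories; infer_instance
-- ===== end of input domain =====

-- B replaces A's single grouping loop over a mutable dict by a per-category predicate and one
-- filtering comprehension per fixed category (objective: alternative decomposition, same cost).

-- shared primitive: dict.get of the category_map (assoc list, first match) — used by both ports
def pyMapGetD (cm : List (String × String)) (k d : String) : String :=
  match cm.find? (fun p => p.1 == k) with
  | some p => p.2
  | none => d

-- shared primitive: tk.split('_', 1)[0] (only evaluated when '_' in tk, so the defaults never fire)
def pyPrefix (tk : String) : String :=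
  ((PySem.Str.splitMax? tk "_" 1).getD []).headD ""

-- ===== PORT A =====
-- the loop body of A (one token updating the cats dict)
def stepA (cm : List (String × String)) (cats : PySem.Dict String (List String)) (tk : String) :
    PySem.Dict String (List String) :=
  if PySem.Str.isIn "_" tk = false then
    PySem.Dict.modify cats "other" [] (fun v => v ++ [tk])
  else
    let cat := pyMapGetD cm (pyPrefix tk) "other"
    if PySem.Dict.contains cats cat = false then
      PySem.Dict.modify cats "other" [] (fun v => v ++ [tk])
    else
      PySem.Dict.modify cats cat [] (fun v => v ++ [tk])

def classify_to_categories (token_list : List String) (category_map : List (String × String)) : List (String × List String) :=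
  (token_list.foldl (stepA category_map)
    (PySem.Dict.ofList [("tongue", []), ("coat", []), ("location", []), ("other", [])])).items

-- ===== PORT B =====
def cat_of (tk : String) (cm : List (String × String)) : String :=
  if PySem.Str.isIn "_" tk = false then "other"
  else
    let cat := pyMapGetD cm (pyPrefix tk) "other"
    if ["tongue", "coat", "location", "other"].contains cat then cat else "other"

def classify_to_categories_alt (token_list : List String) (category_map : List (String × String)) : List (String × List String) :=
  ["tongue", "coat", "location", "other"].map
    (fun c => (c, token_list.filter (fun tk => cat_of tk category_map == c)))

-- ===== PRECONDITION & SPEC =====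
def Spec_classify_to_categories (token_list : List String) (category_map : List (String × String)) (out : List (String × List String)) : Prop := out = classify_to_categories_alt token_list category_map
instance (token_list : List String) (category_map : List (String × String)) (out : List (String × List String)) : Decidable (Spec_classify_to_categories token_list category_map out) := by unfold Spec_classify_to_categories; infer_instance

-- ===== CLAIM (what is proved, stated in full; the proofs are below) =====
def Claim_equal_classify_to_categories : Prop := ∀ (token_list : List String) (category_map : List (String × String)), Dom_classify_to_categories token_list category_map → Spec_classify_to_categories token_list category_map (classify_to_categories token_list category_map)

-- ===== LEMMAS AND PROOFS =====

lemma foldA_filter (cm : List (String × String)) (tl : List String) (t c l o : List String) :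
    List.foldl (stepA cm) (PySem.Dict.mk [("tongue", t), ("coat", c), ("location", l), ("other", o)]) tl =
    PySem.Dict.mk [("tongue", t ++ tl.filter (fun tk => cat_of tk cm == "tongue")),
                   ("coat", c ++ tl.filter (fun tk => cat_of tk cm == "coat")),
                   ("location", l ++ tl.filter (fun tk => cat_of tk cm == "location")),
                   ("other", o ++ tl.filter (fun tk => cat_of tk cm == "other"))] := by
  induction tl generalizing t c l o with
  | nil => simp
  | cons tk tl ih =>
    have key : ∀ t c l o : List String,
        stepA cm (PySem.Dict.mk [("tongue", t), ("coat", c), ("location", l), ("other", o)]) tk =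
        if cat_of tk cm = "tongue" then PySem.Dict.mk [("tongue", t ++ [tk]), ("coat", c), ("location", l), ("other", o)]
        else if cat_of tk cm = "coat" then PySem.Dict.mk [("tongue", t), ("coat", c ++ [tk]), ("location", l), ("other", o)]
        else if cat_of tk cm = "location" then PySem.Dict.mk [("tongue", t), ("coat", c), ("location", l ++ [tk]), ("other", o)]
        else PySem.Dict.mk [("tongue", t), ("coat", c), ("location", l), ("other", o ++ [tk])] := by
      intro t c l o
      cases hu : PySem.Chars.isIn ['_'] tk.toList with
      | false =>
        simp [stepA, cat_of, hu, PySem.Dict.modify, PySem.Dict.insert,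
              PySem.Dict.getD, PySem.Dict.get?]
      | true =>
        by_cases h1 : pyMapGetD cm (pyPrefix tk) "other" = "tongue"
        · simp [stepA, cat_of, hu, h1, PySem.Dict.modify, PySem.Dict.insert,
                PySem.Dict.getD, PySem.Dict.get?, PySem.Dict.contains]
        · by_cases h2 : pyMapGetD cm (pyPrefix tk) "other" = "coat"
          · simp [stepA, cat_of, hu, h2, PySem.Dict.modify, PySem.Dict.insert,
                  PySem.Dict.getD, PySem.Dict.get?, PySem.Dict.contains]
          · by_cases h3 : pyMapGetD cm (pyPrefix tk) "other" = "location"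
            · simp [stepA, cat_of, hu, h3, PySem.Dict.modify, PySem.Dict.insert,
                    PySem.Dict.getD, PySem.Dict.get?, PySem.Dict.contains]
            · by_cases h4 : pyMapGetD cm (pyPrefix tk) "other" = "other"
              · simp [stepA, cat_of, hu, h4, PySem.Dict.modify, PySem.Dict.insert,
                      PySem.Dict.getD, PySem.Dict.get?, PySem.Dict.contains]
              · simp [stepA, cat_of, hu, h1, h2, h3, h4, PySem.Dict.modify, PySem.Dict.insert,
                      PySem.Dict.getD, PySem.Dict.get?, PySem.Dict.contains, Ne.symm h1, Ne.symm h2, Ne.symm h3, Ne.symm h4]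
    rw [List.foldl_cons, key]
    have hmem : cat_of tk cm = "tongue" ∨ cat_of tk cm = "coat" ∨ cat_of tk cm = "location" ∨ cat_of tk cm = "other" := by
      unfold cat_of
      split_ifs <;> simp_all; split_ifs <;> tauto
    rcases hmem with g | g | g | g <;>
      simp [g, ih, List.append_assoc]

-- ===== VERDICT (by name: the statement is the Claim_ definition above) =====
theorem classify_to_categories_spec : Claim_equal_classify_to_categories := by
  intro token_list category_map _
  show _ = _
  unfold classify_to_categories classify_to_categories_alt
  rw [show (PySem.Dict.ofList [("tongue", ([] : List String)), ("coat", []), ("location", []), ("other", [])]) = PySem.Dict.mk [("tongue", []), ("coat", []), ("location", []), ("other", [])] from rfl]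
  rw [foldA_filter]
  simp
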